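-- pv_equiv track=rewrite | github.com/Is-Jun/BUAA_CST_Cryptography_Experiment_2023 | 实验1/有限域/有限域扩展欧几里得算法.py | extend_gcd
-- ===== SOURCE A (Python) =====
-- poly = 0x11b
--
-- def multiply(a, b):
--     ans = 0
--     while b > 0:
--         if b & 0x01 == 0x01:
--             ans ^= a
--         a <<= 1
--         if a & 0x100 == 0x100:
--             a ^= poly
--         a &= 0xff
--         b >>= 1
--     return ans
--
-- def divide(a, b):
--     ans = 0
--     while len(bin(a)) >= len(bin(b)):  # 商为ans 余数为a
--         if a == 0:
--             break
--         rec = len(bin(a)) - len(bin(b))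
--         a ^= (b << rec)
--         ans ^= (1 << rec)
--     return ans, a
--
-- def extend_gcd(a, b):
--     if b == 0:
--         return 1, 0, a
--     else:
--         _x, _y, gcd = extend_gcd(b, divide(a, b)[1])
--         x = _y
--         y = _x ^ multiply(_y, divide(a, b)[0])
--     return x, y, gcd
-- ===== SOURCE B (Python) =====
-- poly = 0x11b
--
-- def multiply(a, b):
--     ans = 0
--     while b > 0:
--         if b & 0x01 == 0x01:
--             ans ^= a
--         a <<= 1
--         if a & 0x100 == 0x100:
--             a ^= poly
--         a &= 0xff
--         b >>= 1
--     return ans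
--
-- def divide(a, b):
--     ans = 0
--     while len(bin(a)) >= len(bin(b)):
--         if a == 0:
--             break
--         rec = len(bin(a)) - len(bin(b))
--         a ^= (b << rec)
--         ans ^= (1 << rec)
--     return ans, a
--
-- def extend_gcd(a, b):
--     # forward pass: remainder sequence, collecting the quotients (one divide per step)
--     qs = []
--     while b != 0:
--         q, r = divide(a, b)
--         qs.append(q)
--         a, b = b, r
--     # backward pass: rebuild the Bezout coefficients from the quotients
--     x, y = 1, 0
--     for q in reversed(qs):
--         x, y = y, x ^ multiply(y, q)
--     return x, y, a
-- ===== Notes on version B (the rewrite author's own statement) =====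
-- stated objective: alternative
-- what changed: Replaces A's recursion (which calls divide twice per level and rebuilds coefficients while unwinding) with two explicit loops: a forward remainder loop collecting the quotient list with one divide per step, then a backward fold over the reversed quotients rebuilding the Bezout coefficients.
import Mathlib
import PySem

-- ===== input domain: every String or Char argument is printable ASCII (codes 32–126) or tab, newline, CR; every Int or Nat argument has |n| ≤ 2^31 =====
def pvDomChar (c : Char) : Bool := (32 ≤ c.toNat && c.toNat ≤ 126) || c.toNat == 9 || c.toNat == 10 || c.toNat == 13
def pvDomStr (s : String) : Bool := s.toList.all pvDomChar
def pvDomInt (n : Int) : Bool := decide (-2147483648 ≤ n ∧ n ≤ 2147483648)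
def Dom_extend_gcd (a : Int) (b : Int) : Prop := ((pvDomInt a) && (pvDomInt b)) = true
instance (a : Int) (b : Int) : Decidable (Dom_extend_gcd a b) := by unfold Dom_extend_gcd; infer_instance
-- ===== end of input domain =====

-- B replaces A's double recursion (two divide calls per level) by a two-pass loop: a forward
-- remainder loop collecting the quotients (one divide per step), then a backward fold over the
-- reversed quotient list rebuilding the coefficients; objective: alternative decomposition.

-- ===== PORT A =====
-- Shared helpers: multiply and divide are identical, verbatim, in Source A and Source B.

-- len(bin(a)) : Python's bin via PySem.Int.pyBin, len via PySem.Str.len (exact, also on negatives)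
def pvBinLen (a : Int) : Int := PySem.Str.len (PySem.Int.pyBin a)

-- multiply(a, b): while b > 0 — each iteration halves b, so fuel b.toNat.size + 1 suffices
def pvMulGo : Nat → Int → Int → Int → Int
  | 0, _, _, ans => ans
  | n + 1, a, b, ans =>
    if b > 0 then
      let ans := if PySem.Int.band b 0x01 = 0x01 then PySem.Int.bxor ans a else ans
      let a := a <<< (1 : Nat)
      let a := if PySem.Int.band a 0x100 = 0x100 then PySem.Int.bxor a 0x11b else a
      let a := PySem.Int.band a 0xff
      pvMulGo n a (b >>> (1 : Nat)) ans
    else ans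

def pvMul (a b : Int) : Int := pvMulGo (b.toNat.size + 1) a b 0

-- divide(a, b): while-loop with fuel; the shift amount is ≥ 0 in the executed branch (the loop
-- guard is pvBinLen a ≥ pvBinLen b), so `.toNat` on it is exact.
def pvDivGo : Nat → Int → Int → Int → Int × Int
  | 0, a, _, ans => (ans, a)
  | n + 1, a, b, ans =>
    if pvBinLen a ≥ pvBinLen b then
      if a = 0 then (ans, a)
      else
        let k := (pvBinLen a - pvBinLen b).toNat
        pvDivGo n (PySem.Int.bxor a (b <<< k)) b (PySem.Int.bxor ans ((1 : Int) <<< k))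
    else (ans, a)

-- fuel for the while-loop: on every input on which the Python loop terminates, the iteration
-- count stays below len(bin(a)) + len(bin(b)) + 1 (for 0 ≤ a, 0 < b each iteration clears a's top bit)
def pvDivide (a b : Int) : Int × Int := pvDivGo ((pvBinLen a).toNat + (pvBinLen b).toNat + 1) a b 0

-- extend_gcd(a, b): recursion with fuel; on every input on which the Python recursion terminates,
-- its depth stays below len(bin(a)) + len(bin(b)) + 1 (for 0 ≤ a, 0 < b remainder bit lengths strictly decrease)
def pvEgcdGo : Nat → Int → Int → Int × Int × Int
  | 0, a, _ => (1, 0, a)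
  | n + 1, a, b =>
    if b = 0 then (1, 0, a)
    else
      let p := pvEgcdGo n b (pvDivide a b).2
      let x := p.2.1
      let y := PySem.Int.bxor p.1 (pvMul p.2.1 (pvDivide a b).1)
      (x, y, p.2.2)

def extend_gcd (a : Int) (b : Int) : Int × Int × Int := pvEgcdGo ((pvBinLen a).toNat + (pvBinLen b).toNat + 1) a b

-- ===== PORT B =====
-- forward pass: while b != 0, one divide per step, appending the quotient
def pvQListGo : Nat → Int → Int → List Int → List Int × Int
  | 0, a, _, qs => (qs, a)
  | n + 1, a, b, qs =>
    if b ≠ 0 then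
      let p := pvDivide a b
      pvQListGo n b p.2 (qs ++ [p.1])
    else (qs, a)

-- one step of the backward pass: x, y = y, x ^ multiply(y, q)
def pvBackStep (xy : Int × Int) (q : Int) : Int × Int :=
  (xy.2, PySem.Int.bxor xy.1 (pvMul xy.2 q))

def extend_gcd_alt (a : Int) (b : Int) : Int × Int × Int :=
  let p := pvQListGo ((pvBinLen a).toNat + (pvBinLen b).toNat + 1) a b []
  let xy := p.1.reverse.foldl pvBackStep (1, 0)
  (xy.1, xy.2, p.2)

-- ===== PRECONDITION & SPEC =====
def Spec_extend_gcd (a : Int) (b : Int) (out : Int × Int × Int) : Prop := out = extend_gcd_alt a b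
instance (a : Int) (b : Int) (out : Int × Int × Int) : Decidable (Spec_extend_gcd a b out) := by unfold Spec_extend_gcd; infer_instance

-- ===== CLAIM (what is proved, stated in full; the proofs are below) =====
def Claim_equal_extend_gcd : Prop := ∀ (a : Int) (b : Int), Dom_extend_gcd a b → Spec_extend_gcd a b (extend_gcd a b)

-- ===== LEMMAS AND PROOFS =====

-- Proof-side recursive characterisation of the quotient list and final remainder.
def pvQRec : Nat → Int → Int → List Int × Int
  | 0, a, _ => ([], a)
  | n + 1, a, b =>
    if b = 0 then ([], a)
    else
      let p := pvDivide a b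
      let q := pvQRec n b p.2
      (p.1 :: q.1, q.2)

theorem pvQListGo_eq (n : Nat) : ∀ (a b : Int) (qs : List Int),
    pvQListGo n a b qs = (qs ++ (pvQRec n a b).1, (pvQRec n a b).2) := by
  induction n with
  | zero => intro a b qs; simp [pvQListGo, pvQRec]
  | succ n ih =>
    intro a b qs
    by_cases hb : b = 0
    · simp [pvQListGo, pvQRec, hb]
    · simp [pvQListGo, pvQRec, hb, ih]

theorem pvEgcdGo_eq (n : Nat) : ∀ (a b : Int),
    pvEgcdGo n a b =
      (((pvQRec n a b).1.reverse.foldl pvBackStep (1, 0)).1,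
       ((pvQRec n a b).1.reverse.foldl pvBackStep (1, 0)).2,
       (pvQRec n a b).2) := by
  induction n with
  | zero => intro a b; simp [pvEgcdGo, pvQRec]
  | succ n ih =>
    intro a b
    by_cases hb : b = 0
    · simp [pvEgcdGo, pvQRec, hb]
    · simp only [pvEgcdGo, pvQRec, hb, ite_false, ih]
      simp [List.foldl_append, pvBackStep]

-- ===== VERDICT (by name: the statement is the Claim_ definition above) =====
theorem extend_gcd_spec : Claim_equal_extend_gcd := by
  intro a b _
  unfold Spec_extend_gcd extend_gcd extend_gcd_alt
  simp only [pvEgcdGo_eq, pvQListGo_eq, List.nil_append]
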